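-- pv_equiv track=rewrite | github.com/HereticFy/MSC_project | flow_with_label.py | transfer_orignal_label
-- ===== SOURCE A (Python) =====
-- def transfer_orignal_label(target_list):
--   result = []
--   for i in range(len(target_list)):
--
--     if target_list[i] == 0 or target_list[i] == 5:
--       result.append(0)
--     elif target_list[i] == 2 or target_list[i] == 3:
--       result.append(1)
--     elif target_list[i] == 13 or target_list[i] == 23:
--       result.append(2)
--     elif target_list[i] == 24 or target_list[i] == 27:
--       result.append(3)
--
--     elif target_list[i] == 16 or target_list[i] == 22:
--       result.append(4)
--
--     elif target_list[i] == 6 or target_list[i] == 15: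
--       result.append(5)
--
--     elif target_list[i] == 14 or target_list[i] == 20:
--       result.append(6)
--
--     elif target_list[i] == 18 or target_list[i] == 25:
--       result.append(7)
--
--     elif target_list[i] == 4 or target_list[i] == 11:
--       result.append(8)
--
--     elif target_list[i] == 8 or target_list[i] == 10:
--       result.append(9)
--
--     elif target_list[i] == 21 or target_list[i] == 17:
--       result.append(10)
--
--     elif target_list[i] == 7 or target_list[i] == 19:
--       result.append(11)
--
--     elif target_list[i] == 9 or target_list[i] == 26:
--       result.append(12)
--     else:
--       result.append(13)
--   return result
-- ===== SOURCE B (Python) =====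
-- def transfer_orignal_label(target_list):
--     pairs = [(0, 5), (2, 3), (13, 23), (24, 27), (16, 22), (6, 15), (14, 20),
--              (18, 25), (4, 11), (8, 10), (21, 17), (7, 19), (9, 26)]
--     result = [13] * len(target_list)
--     for cls, (a, b) in enumerate(pairs):
--         result = [cls if x == a or x == b else r for r, x in zip(result, target_list)]
--     return result
-- ===== Notes on version B (the rewrite author's own statement) =====
-- stated objective: alternative
-- what changed: Instead of deciding each element's class with a per-element comparison cascade in one pass, B pre-fills the whole result with the default 13 and then makes one staged pass per class (13 passes), overwriting the positions whose source value belongs to that class; correctness rests on the class value-sets being pairwise disjoint.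
import Mathlib
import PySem

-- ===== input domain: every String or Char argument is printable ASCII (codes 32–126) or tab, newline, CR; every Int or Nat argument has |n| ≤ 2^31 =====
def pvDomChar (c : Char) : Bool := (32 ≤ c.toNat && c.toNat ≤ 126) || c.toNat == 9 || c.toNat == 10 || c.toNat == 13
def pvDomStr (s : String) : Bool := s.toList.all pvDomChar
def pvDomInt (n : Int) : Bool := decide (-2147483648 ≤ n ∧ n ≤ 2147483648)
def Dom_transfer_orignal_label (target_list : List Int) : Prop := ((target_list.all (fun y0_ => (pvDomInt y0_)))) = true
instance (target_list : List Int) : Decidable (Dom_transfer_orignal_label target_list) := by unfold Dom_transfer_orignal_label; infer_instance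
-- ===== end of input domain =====

-- B replaces A's single pass with a per-element 13-branch comparison cascade by
-- a default-filled result refined by one staged pass per class (correct since the
-- class value-sets are pairwise disjoint); alternative decomposition, same asymptotics.

-- ===== PORT A =====
-- index loop 'for i in range(len(target_list))' appending to result; the
-- index is always in range, so target_list[i] is ported as pyGetD with dummy default 0
def transfer_orignal_label (target_list : List Int) : List Int :=
  (PySem.List.pyRange 0 target_list.length 1).foldl (fun result i =>
    let x := PySem.List.pyGetD target_list i 0
    result ++ [
      if x = 0 ∨ x = 5 then (0 : Int)
      else if x = 2 ∨ x = 3 then 1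
      else if x = 13 ∨ x = 23 then 2
      else if x = 24 ∨ x = 27 then 3
      else if x = 16 ∨ x = 22 then 4
      else if x = 6 ∨ x = 15 then 5
      else if x = 14 ∨ x = 20 then 6
      else if x = 18 ∨ x = 25 then 7
      else if x = 4 ∨ x = 11 then 8
      else if x = 8 ∨ x = 10 then 9
      else if x = 21 ∨ x = 17 then 10
      else if x = 7 ∨ x = 19 then 11
      else if x = 9 ∨ x = 26 then 12
      else 13]) []

-- ===== PORT B =====
-- the literal 'pairs' list: class c holds the two source values (a, b)
def pvPairs : List (Int × Int) :=
  [(0, 5), (2, 3), (13, 23), (24, 27), (16, 22), (6, 15), (14, 20),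
   (18, 25), (4, 11), (8, 10), (21, 17), (7, 19), (9, 26)]

-- for cls,(a,b) in enumerate(pairs): result = [cls if x==a or x==b else r for r,x in zip(result,target_list)]
def transfer_orignal_label_alt (target_list : List Int) : List Int :=
  (PySem.List.enumerate pvPairs).foldl
    (fun result p =>
      (result.zip target_list).map (fun rx =>
        if rx.2 = p.2.1 ∨ rx.2 = p.2.2 then p.1 else rx.1))
    (target_list.map (fun _ => (13 : Int)))

-- ===== PRECONDITION & SPEC =====
def Spec_transfer_orignal_label (target_list : List Int) (out : List Int) : Prop := out = transfer_orignal_label_alt target_list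
instance (target_list : List Int) (out : List Int) : Decidable (Spec_transfer_orignal_label target_list out) := by unfold Spec_transfer_orignal_label; infer_instance

-- ===== CLAIM =====
def Claim_equal_transfer_orignal_label : Prop := ∀ (target_list : List Int), Dom_transfer_orignal_label target_list → Spec_transfer_orignal_label target_list (transfer_orignal_label target_list)

-- ===== LEMMAS AND PROOFS =====

-- A's per-element cascade as a function
def pvCascade (x : Int) : Int :=
  if x = 0 ∨ x = 5 then (0 : Int)
  else if x = 2 ∨ x = 3 then 1
  else if x = 13 ∨ x = 23 then 2
  else if x = 24 ∨ x = 27 then 3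
  else if x = 16 ∨ x = 22 then 4
  else if x = 6 ∨ x = 15 then 5
  else if x = 14 ∨ x = 20 then 6
  else if x = 18 ∨ x = 25 then 7
  else if x = 4 ∨ x = 11 then 8
  else if x = 8 ∨ x = 10 then 9
  else if x = 21 ∨ x = 17 then 10
  else if x = 7 ∨ x = 19 then 11
  else if x = 9 ∨ x = 26 then 12
  else 13

-- the staged fold acts elementwise: it commutes with cons on (result, target_list)
lemma stagedFold_cons (ps : List (Int × Int × Int)) (r : Int) (rs : List Int)
    (x : Int) (xs : List Int) :
    ps.foldl (fun result p =>
        ((result.zip (x :: xs)).map (fun rx =>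
          if rx.2 = p.2.1 ∨ rx.2 = p.2.2 then p.1 else rx.1)))
      (r :: rs)
    = (ps.foldl (fun v p => if x = p.2.1 ∨ x = p.2.2 then p.1 else v) r)
      :: ps.foldl (fun result p =>
          ((result.zip xs).map (fun rx =>
            if rx.2 = p.2.1 ∨ rx.2 = p.2.2 then p.1 else rx.1))) rs := by
  induction ps generalizing r rs with
  | nil => rfl
  | cons p ps ih => simp [List.foldl_cons, List.zip_cons_cons, List.map_cons, ih]

-- on one element, the 13 staged overwrites starting from 13 compute A's cascade
lemma stagedElem_eq_cascade (x : Int) :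
    (PySem.List.enumerate pvPairs).foldl
      (fun v p => if x = p.2.1 ∨ x = p.2.2 then p.1 else v) 13 = pvCascade x := by
  unfold pvCascade
  by_cases h1 : x = 0 ∨ x = 5
  · rw [if_pos h1]; rcases h1 with rfl | rfl <;> decide
  rw [if_neg h1]
  by_cases h2 : x = 2 ∨ x = 3
  · rw [if_pos h2]; rcases h2 with rfl | rfl <;> decide
  rw [if_neg h2]
  by_cases h3 : x = 13 ∨ x = 23
  · rw [if_pos h3]; rcases h3 with rfl | rfl <;> decide
  rw [if_neg h3]
  by_cases h4 : x = 24 ∨ x = 27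
  · rw [if_pos h4]; rcases h4 with rfl | rfl <;> decide
  rw [if_neg h4]
  by_cases h5 : x = 16 ∨ x = 22
  · rw [if_pos h5]; rcases h5 with rfl | rfl <;> decide
  rw [if_neg h5]
  by_cases h6 : x = 6 ∨ x = 15
  · rw [if_pos h6]; rcases h6 with rfl | rfl <;> decide
  rw [if_neg h6]
  by_cases h7 : x = 14 ∨ x = 20
  · rw [if_pos h7]; rcases h7 with rfl | rfl <;> decide
  rw [if_neg h7]
  by_cases h8 : x = 18 ∨ x = 25
  · rw [if_pos h8]; rcases h8 with rfl | rfl <;> decide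
  rw [if_neg h8]
  by_cases h9 : x = 4 ∨ x = 11
  · rw [if_pos h9]; rcases h9 with rfl | rfl <;> decide
  rw [if_neg h9]
  by_cases h10 : x = 8 ∨ x = 10
  · rw [if_pos h10]; rcases h10 with rfl | rfl <;> decide
  rw [if_neg h10]
  by_cases h11 : x = 21 ∨ x = 17
  · rw [if_pos h11]; rcases h11 with rfl | rfl <;> decide
  rw [if_neg h11]
  by_cases h12 : x = 7 ∨ x = 19
  · rw [if_pos h12]; rcases h12 with rfl | rfl <;> decide
  rw [if_neg h12]
  by_cases h13 : x = 9 ∨ x = 26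
  · rw [if_pos h13]; rcases h13 with rfl | rfl <;> decide
  rw [if_neg h13]
  simp only [PySem.List.enumerate, pvPairs, List.foldl_cons, List.foldl_nil]
  push Not at h1 h2 h3 h4 h5 h6 h7 h8 h9 h10 h11 h12 h13
  simp_all

-- B computes the elementwise cascade map
lemma alt_eq_map_cascade (target_list : List Int) :
    transfer_orignal_label_alt target_list = target_list.map pvCascade := by
  unfold transfer_orignal_label_alt
  induction target_list with
  | nil => decide
  | cons x xs ih =>
      simp only [List.map_cons]
      rw [stagedFold_cons, stagedElem_eq_cascade, ih]

-- ===== VERDICT =====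
theorem transfer_orignal_label_spec : Claim_equal_transfer_orignal_label := by
  intro target_list _
  unfold Spec_transfer_orignal_label
  rw [alt_eq_map_cascade]
  unfold transfer_orignal_label
  rw [show (fun (result : List Int) (i : Int) =>
        let x := PySem.List.pyGetD target_list i 0
        result ++ [
          if x = 0 ∨ x = 5 then (0 : Int)
          else if x = 2 ∨ x = 3 then 1
          else if x = 13 ∨ x = 23 then 2
          else if x = 24 ∨ x = 27 then 3
          else if x = 16 ∨ x = 22 then 4
          else if x = 6 ∨ x = 15 then 5
          else if x = 14 ∨ x = 20 then 6
          else if x = 18 ∨ x = 25 then 7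
          else if x = 4 ∨ x = 11 then 8
          else if x = 8 ∨ x = 10 then 9
          else if x = 21 ∨ x = 17 then 10
          else if x = 7 ∨ x = 19 then 11
          else if x = 9 ∨ x = 26 then 12
          else 13]) =
      (fun result i => result ++ [pvCascade (PySem.List.pyGetD target_list i 0)])
    from funext fun r => funext fun i => by simp only [pvCascade]]
  rw [PySem.List.foldl_pyRange_zero_pyGetD' target_list 0
    (fun acc x => acc ++ [pvCascade x]) []]
  rw [PySem.List.foldl_append_singleton_eq_map]
  simp
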